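-- pv_equiv track=rewrite | github.com/typicalwestern/pythonlessons | N20-in10401.py | func28
-- ===== SOURCE A (Python) =====
-- def func28(x):
--     a = 0
--     b = 0
--     while x > 0:
--         if x % 2 > 0:
--             a += 1
--         else:
--             b += x % 6
--         x = x // 6
--     return a, b
-- ===== SOURCE B (Python) =====
-- def func28(x):
--     digits = []
--     while x > 0:
--         digits.append(x % 6)
--         x //= 6
--     a = sum(1 for d in digits if d % 2)
--     b = sum(d for d in digits if d % 2 == 0)
--     return a, b
-- ===== Notes on version B (the rewrite author's own statement) =====
-- stated objective: simpler
-- what changed: B first extracts the base-6 digits in one loop, then computes the two results as independent reductions (count of odd digits, sum of even digits), using that the parity of x equals the parity of its lowest base-6 digit; A fuses everything into a single stateful loop.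
import Mathlib
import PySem

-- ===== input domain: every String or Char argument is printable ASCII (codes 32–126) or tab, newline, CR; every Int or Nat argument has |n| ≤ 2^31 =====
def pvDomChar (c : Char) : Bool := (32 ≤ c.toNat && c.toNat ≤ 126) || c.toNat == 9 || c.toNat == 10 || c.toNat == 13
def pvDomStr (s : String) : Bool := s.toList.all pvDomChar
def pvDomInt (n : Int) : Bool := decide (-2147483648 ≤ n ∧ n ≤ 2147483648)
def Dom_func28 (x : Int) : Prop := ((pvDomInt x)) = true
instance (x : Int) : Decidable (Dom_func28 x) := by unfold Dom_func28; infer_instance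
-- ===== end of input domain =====

-- B extracts the base-6 digits first, then counts odd digits and sums even digits
-- in two independent reductions (simpler decomposition; same asymptotic cost as A).


-- ===== PORT A =====
def func28_loop (x a b : Int) : Int × Int :=
  if _h : x > 0 then
    if PySem.Int.mod x 2 > 0 then
      func28_loop (PySem.Int.floordiv x 6) (a + 1) b
    else
      func28_loop (PySem.Int.floordiv x 6) a (b + PySem.Int.mod x 6)
  else (a, b)
termination_by x.toNat
decreasing_by
  all_goals
    rw [PySem.Int.floordiv_eq_ediv_of_pos (by norm_num : (0:Int) < 6)]
    omega

def func28 (x : Int) : Int × Int := func28_loop x 0 0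

-- ===== PORT B =====
def digits6 (x : Int) : List Int :=
  if _h : x > 0 then PySem.Int.mod x 6 :: digits6 (PySem.Int.floordiv x 6) else []
termination_by x.toNat
decreasing_by
  rw [PySem.Int.floordiv_eq_ediv_of_pos (by norm_num : (0:Int) < 6)]
  omega

def func28_alt (x : Int) : Int × Int :=
  let ds := digits6 x
  (((ds.filter (fun d => PySem.Int.mod d 2 != 0)).length : Int),
   (ds.filter (fun d => PySem.Int.mod d 2 == 0)).sum)

-- ===== PRECONDITION & SPEC =====
def Spec_func28 (x : Int) (out : Int × Int) : Prop := out = func28_alt x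
instance (x : Int) (out : Int × Int) : Decidable (Spec_func28 x out) := by unfold Spec_func28; infer_instance

-- ===== CLAIM (what is proved, stated in full; the proofs are below) =====
def Claim_equal_func28 : Prop := ∀ (x : Int), Dom_func28 x → Spec_func28 x (func28 x)

-- ===== LEMMAS AND PROOFS =====

-- the loop accumulates exactly B's two reductions over the digit list
theorem func28_loop_eq (x a b : Int) :
    func28_loop x a b =
      (a + (((digits6 x).filter (fun d => PySem.Int.mod d 2 != 0)).length : Int),
       b + ((digits6 x).filter (fun d => PySem.Int.mod d 2 == 0)).sum) := by
  fun_induction func28_loop x a b with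
  | case1 x a b hx hodd ih =>
    rw [digits6, dif_pos hx]
    have hd : (PySem.Int.mod (PySem.Int.mod x 6) 2 != 0) = true := by
      rw [PySem.Int.mod_eq_emod_of_pos (by norm_num : (0:Int) < 2),
          PySem.Int.mod_eq_emod_of_pos (by norm_num : (0:Int) < 6)]
      rw [PySem.Int.mod_eq_emod_of_pos (by norm_num : (0:Int) < 2)] at hodd
      simp only [bne_iff_ne, ne_eq]
      omega
    simp only [List.filter_cons, hd]
    have hd2 : (PySem.Int.mod (PySem.Int.mod x 6) 2 == 0) = false := by
      simpa using hd
    simp only [hd2, if_neg (by simp : ¬ false = true), ih, Prod.mk.injEq]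
    refine ⟨?_, trivial⟩
    push_cast [List.length_cons]; ring
  | case2 x a b hx hodd ih =>
    rw [digits6, dif_pos hx]
    have hd : (PySem.Int.mod (PySem.Int.mod x 6) 2 == 0) = true := by
      rw [PySem.Int.mod_eq_emod_of_pos (by norm_num : (0:Int) < 2),
          PySem.Int.mod_eq_emod_of_pos (by norm_num : (0:Int) < 6)]
      rw [PySem.Int.mod_eq_emod_of_pos (by norm_num : (0:Int) < 2)] at hodd
      simp only [beq_iff_eq]
      omega
    have hd1 : (PySem.Int.mod (PySem.Int.mod x 6) 2 != 0) = false := by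
      simp only [beq_iff_eq] at hd
      simpa using hd
    simp only [List.filter_cons, hd, hd1, if_neg (by simp : ¬ false = true), ih,
      if_pos trivial, List.sum_cons, Prod.mk.injEq]
    refine ⟨trivial, ?_⟩
    ring
  | case3 x a b hx =>
    rw [digits6, dif_neg hx]
    simp

-- ===== VERDICT (by name: the statement is the Claim_ definition above) =====
theorem func28_spec : Claim_equal_func28 := by
  intro x _
  unfold Spec_func28 func28 func28_alt
  rw [func28_loop_eq]
  simp
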